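-- pv_equiv track=rewrite | github.com/Petercitoo/segunda-entrega | src/Ejercicio_2.py | minSegs
-- ===== SOURCE A (Python) =====
-- def minSegs(ms):
--     totM = 0
--     totS = 0
--     for i in ms:
--         totM += int(i[0])
--         totS += int(i[1])
--
--     totM += totS//60
--     totS = totS%60
--
--     return totM, totS
-- ===== SOURCE B (Python) =====
-- def minSegs(ms):
--     # Recursive back-to-front combine with per-step carry normalization:
--     # each pair is merged into the already-normalized (minutes, seconds) of
--     # the suffix, so seconds never exceed 59 and no final normalization pass
--     # is needed.
--     def go(i):
--         if i == len(ms):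
--             return (0, 0)
--         m, s = go(i + 1)
--         q, r = divmod(s + int(ms[i][1]), 60)
--         return (m + q + int(ms[i][0]), r)
--     return go(0)
-- ===== Notes on version B (the rewrite author's own statement) =====
-- stated objective: alternative
-- what changed: Replaces the left-to-right two-accumulator loop with final //60,%60 normalization by a back-to-front recursion that merges each pair into an already-normalized (minutes, seconds) state, carrying the divmod at every step so no final normalization exists.
import Mathlib
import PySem

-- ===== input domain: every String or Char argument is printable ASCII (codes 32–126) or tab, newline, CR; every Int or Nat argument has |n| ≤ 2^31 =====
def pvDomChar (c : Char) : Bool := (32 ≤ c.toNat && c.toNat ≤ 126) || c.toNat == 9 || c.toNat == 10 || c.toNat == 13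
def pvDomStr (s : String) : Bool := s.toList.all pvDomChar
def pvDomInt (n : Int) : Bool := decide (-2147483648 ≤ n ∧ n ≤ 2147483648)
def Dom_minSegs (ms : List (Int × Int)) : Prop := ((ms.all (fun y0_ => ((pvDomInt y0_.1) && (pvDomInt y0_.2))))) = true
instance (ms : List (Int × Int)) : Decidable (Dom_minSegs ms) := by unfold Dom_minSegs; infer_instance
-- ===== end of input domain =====

-- B replaces A's two-accumulator loop + final //60,%60 normalization by a back-to-front
-- recursion that folds each pair into an already-normalized (minutes, seconds) state,
-- carrying the divmod at every step (objective: alternative).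

-- ===== PORT A =====
def minSegs (ms : List (Int × Int)) : Int × Int :=
  let st := ms.foldl (fun (st : Int × Int) i => (st.1 + i.1, st.2 + i.2)) (0, 0)
  let totM := st.1 + PySem.Int.floordiv st.2 60
  let totS := PySem.Int.mod st.2 60
  (totM, totS)

-- ===== PORT B =====
-- go(i) of Source B, recursing on the suffix of ms
def minSegsAltGo (ms : List (Int × Int)) : Int × Int :=
  match ms with
  | [] => (0, 0)
  | i :: tl =>
      let ms' := minSegsAltGo tl
      let q := PySem.Int.floordiv (ms'.2 + i.2) 60
      let r := PySem.Int.mod (ms'.2 + i.2) 60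
      (ms'.1 + q + i.1, r)

def minSegs_alt (ms : List (Int × Int)) : Int × Int := minSegsAltGo ms

-- ===== PRECONDITION & SPEC =====
def Spec_minSegs (ms : List (Int × Int)) (out : Int × Int) : Prop := out = minSegs_alt ms
instance (ms : List (Int × Int)) (out : Int × Int) : Decidable (Spec_minSegs ms out) := by unfold Spec_minSegs; infer_instance

-- ===== CLAIM (what is proved, stated in full; the proofs are below) =====
def Claim_equal_minSegs : Prop := ∀ (ms : List (Int × Int)), Dom_minSegs ms → Spec_minSegs ms (minSegs ms)

-- ===== LEMMAS AND PROOFS =====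

-- B's recursion computes the normalized pair of the plain sums.
theorem pv_go_eq (ms : List (Int × Int)) :
    minSegsAltGo ms
      = ((ms.map Prod.fst).sum + PySem.Int.floordiv (ms.map Prod.snd).sum 60,
         PySem.Int.mod (ms.map Prod.snd).sum 60) := by
  induction ms with
  | nil => simp [minSegsAltGo, PySem.Int.floordiv, PySem.Int.mod]
  | cons hd tl ih =>
      simp only [minSegsAltGo, ih, List.map_cons, List.sum_cons]
      set S := (tl.map Prod.snd).sum with hS
      simp only [PySem.Int.floordiv_eq_ediv_of_pos (by norm_num : (0:Int) < 60),
          PySem.Int.mod_eq_emod_of_pos (by norm_num : (0:Int) < 60), Prod.mk.injEq]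
      refine ⟨?_, ?_⟩ <;> omega

-- A's fold computes the componentwise sums, from any start.
theorem pv_foldl_sums (ms : List (Int × Int)) (m s : Int) :
    ms.foldl (fun (st : Int × Int) i => (st.1 + i.1, st.2 + i.2)) (m, s)
      = (m + (ms.map Prod.fst).sum, s + (ms.map Prod.snd).sum) := by
  induction ms generalizing m s with
  | nil => simp
  | cons hd tl ih =>
      simp only [List.foldl_cons, ih, List.map_cons, List.sum_cons, Prod.mk.injEq]
      constructor <;> ring

-- ===== VERDICT (by name: the statement is the Claim_ definition above) =====
theorem minSegs_spec : Claim_equal_minSegs := by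
  intro ms _
  unfold Spec_minSegs minSegs minSegs_alt
  rw [pv_foldl_sums, pv_go_eq]
  simp
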